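-- pv_equiv track=rewrite | github.com/matt-baugh/adventofcode-2021 | 2023/utils/file_utils.py | chunk_input
-- ===== SOURCE A (Python) =====
-- from typing import Any, Optional, Union
--
-- def chunk_input(input_list: list, chunk_separator: Any, skip_empty=False):
--     chunks = []
--     curr_chunk = []
--     for e in input_list:
--         if e == chunk_separator:
--             chunks.append(curr_chunk)
--             curr_chunk = []
--         else:
--             curr_chunk.append(e)
--     if curr_chunk or not skip_empty:
--         chunks.append(curr_chunk)
--
--     if skip_empty:
--         chunks = [c for c in chunks if c]
--
--     return chunks
-- ===== SOURCE B (Python) =====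
-- def chunk_input(input_list: list, chunk_separator, skip_empty=False):
--     # Two-phase: find separator positions, then slice between them.
--     seps = [i for i, e in enumerate(input_list) if e == chunk_separator]
--     slices = []
--     start = 0
--     for pos in seps:
--         slices.append(input_list[start:pos])
--         start = pos + 1
--     slices.append(input_list[start:])
--     if skip_empty:
--         slices = [c for c in slices if c]
--     return slices
-- ===== Notes on version B (the rewrite author's own statement) =====
-- stated objective: alternative
-- what changed: Replaced the single accumulating pass (grow current chunk, flush on separator) by a two-phase index-then-slice decomposition: first collect all separator positions, then cut the list into slices between consecutive positions, filtering empties at the end.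
import Mathlib
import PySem

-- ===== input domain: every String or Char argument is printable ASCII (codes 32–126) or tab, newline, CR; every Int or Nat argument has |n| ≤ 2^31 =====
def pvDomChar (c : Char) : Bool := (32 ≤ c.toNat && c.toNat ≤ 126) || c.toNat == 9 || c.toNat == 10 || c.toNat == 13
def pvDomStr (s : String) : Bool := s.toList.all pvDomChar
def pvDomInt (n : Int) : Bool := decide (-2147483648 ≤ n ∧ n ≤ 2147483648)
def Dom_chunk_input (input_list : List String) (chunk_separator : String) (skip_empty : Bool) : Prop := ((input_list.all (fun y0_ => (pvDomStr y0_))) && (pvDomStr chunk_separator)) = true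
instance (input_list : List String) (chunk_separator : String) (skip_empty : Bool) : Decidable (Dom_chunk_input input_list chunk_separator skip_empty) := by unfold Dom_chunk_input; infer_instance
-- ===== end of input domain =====

-- B replaces A's single accumulating pass by a two-phase index-then-slice decomposition (objective: alternative; same cost).

-- ===== PORT A =====
def chunk_input (input_list : List String) (chunk_separator : String) (skip_empty : Bool) : List (List String) :=
  let st := input_list.foldl
    (fun (st : List (List String) × List String) e =>
      if e == chunk_separator then (st.1 ++ [st.2], ([] : List String))
      else (st.1, st.2 ++ [e])) ([], [])
  let chunks := if (!st.2.isEmpty) || (!skip_empty) then st.1 ++ [st.2] else st.1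
  if skip_empty then chunks.filter (fun c => !c.isEmpty) else chunks

-- ===== PORT B =====
def chunk_input_alt (input_list : List String) (chunk_separator : String) (skip_empty : Bool) : List (List String) :=
  let seps := (PySem.List.enumerate input_list).foldl
    (fun (acc : List Int) (p : Int × String) => if p.2 == chunk_separator then acc ++ [p.1] else acc) []
  let st := seps.foldl
    (fun (st : List (List String) × Int) pos =>
      (st.1 ++ [PySem.List.slice input_list (some st.2) (some pos)], pos + 1)) ([], 0)
  let slices := st.1 ++ [PySem.List.slice input_list (some st.2) none]
  if skip_empty then slices.filter (fun c => !c.isEmpty) else slices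

-- ===== PRECONDITION & SPEC =====
def Spec_chunk_input (input_list : List String) (chunk_separator : String) (skip_empty : Bool) (out : List (List String)) : Prop := out = chunk_input_alt input_list chunk_separator skip_empty
instance (input_list : List String) (chunk_separator : String) (skip_empty : Bool) (out : List (List String)) : Decidable (Spec_chunk_input input_list chunk_separator skip_empty out) := by unfold Spec_chunk_input; infer_instance

-- ===== CLAIM (what is proved, stated in full; the proofs are below) =====
def Claim_equal_chunk_input : Prop := ∀ (input_list : List String) (chunk_separator : String) (skip_empty : Bool), Dom_chunk_input input_list chunk_separator skip_empty → Spec_chunk_input input_list chunk_separator skip_empty (chunk_input input_list chunk_separator skip_empty)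

-- ===== LEMMAS AND PROOFS =====

-- Reference splitter: all chunks including the (possibly empty) trailing one.
def pvSplits (sep : String) : List String → List (List String)
  | [] => [[]]
  | e :: l =>
    if e == sep then [] :: pvSplits sep l
    else match pvSplits sep l with
      | [] => [[e]]
      | h :: t => (e :: h) :: t

theorem pvSplits_ne_nil (sep : String) (l : List String) : pvSplits sep l ≠ [] := by
  cases l with
  | nil => simp [pvSplits]
  | cons e l =>
    simp only [pvSplits]
    split
    · simp
    · split <;> simp

def pvConsHead (c : List String) : List (List String) → List (List String)
  | [] => [c]
  | h :: t => (c ++ h) :: t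

-- A's loop characterisation.
theorem chunkA_fold (sep : String) (l : List String) :
    ∀ (C : List (List String)) (c : List String),
      (l.foldl (fun (st : List (List String) × List String) e =>
          if e == sep then (st.1 ++ [st.2], ([] : List String))
          else (st.1, st.2 ++ [e])) (C, c)).1
        ++ [(l.foldl (fun (st : List (List String) × List String) e =>
          if e == sep then (st.1 ++ [st.2], ([] : List String))
          else (st.1, st.2 ++ [e])) (C, c)).2]
      = C ++ pvConsHead c (pvSplits sep l) := by
  induction l with
  | nil => intro C c; simp [pvSplits, pvConsHead]
  | cons e l ih =>
    intro C c
    by_cases h : e == sep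
    · simp only [List.foldl_cons, h, if_pos]
      rw [ih]
      simp only [pvSplits, h, if_pos, pvConsHead, List.nil_append, List.append_assoc]
      rcases hs : pvSplits sep l with _ | ⟨hd, tl⟩
      · exact absurd hs (pvSplits_ne_nil sep l)
      · simp
    · simp only [List.foldl_cons, h, if_neg, Bool.false_eq_true, not_false_iff]
      rw [ih]
      simp only [pvSplits, h, if_neg, Bool.false_eq_true, not_false_iff]
      rcases hs : pvSplits sep l with _ | ⟨hd, tl⟩
      · exact absurd hs (pvSplits_ne_nil sep l)
      · simp [pvConsHead]

-- Nat-valued separator positions.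
def pvSepsN (sep : String) : List String → List Nat
  | [] => []
  | e :: l =>
    if e == sep then 0 :: (pvSepsN sep l).map (· + 1)
    else (pvSepsN sep l).map (· + 1)

-- The enumerate/foldl phase computes pvSepsN (as Ints).
theorem seps_foldl_acc (sep : String) (es : List (Int × String)) :
    ∀ (acc : List Int),
      es.foldl (fun (acc : List Int) (p : Int × String) =>
        if p.2 == sep then acc ++ [p.1] else acc) acc
      = acc ++ es.foldl (fun (acc : List Int) (p : Int × String) =>
        if p.2 == sep then acc ++ [p.1] else acc) [] := by
  induction es with
  | nil => intro acc; simp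
  | cons p es ih =>
    intro acc
    by_cases h : p.2 == sep
    · simp only [List.foldl_cons, h, if_pos, List.nil_append]
      rw [ih (acc ++ [p.1]), ih [p.1]]
      simp
    · simp only [List.foldl_cons, h, if_neg, Bool.false_eq_true, not_false_iff]
      exact ih acc

theorem enumerate_shift {α : Type} (l : List α) :
    ∀ s : Int, PySem.List.enumerate l (s + 1)
      = (PySem.List.enumerate l s).map (fun p => (p.1 + 1, p.2)) := by
  induction l with
  | nil => intro s; simp [PySem.List.enumerate_nil]
  | cons e l ih =>
    intro s
    rw [PySem.List.enumerate_cons, PySem.List.enumerate_cons]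
    simp only [List.map_cons]
    rw [show s + 1 + 1 = (s + 1) + 1 by ring, ih (s + 1)]

theorem seps_eq_sepsN (sep : String) (l : List String) :
    (PySem.List.enumerate l).foldl (fun (acc : List Int) (p : Int × String) =>
        if p.2 == sep then acc ++ [p.1] else acc) []
      = (pvSepsN sep l).map (fun n => (Nat.cast n : Int)) := by
  induction l with
  | nil => simp [PySem.List.enumerate_nil, pvSepsN]
  | cons e l ih =>
    have hsh : PySem.List.enumerate l 1
        = (PySem.List.enumerate l 0).map (fun p => (p.1 + 1, p.2)) := by
      have := enumerate_shift l 0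
      simpa using this
    have hmap : ∀ (es : List (Int × String)),
        (es.map (fun p => (p.1 + 1, p.2))).foldl
          (fun (acc : List Int) (p : Int × String) =>
            if p.2 == sep then acc ++ [p.1] else acc) []
        = (es.foldl (fun (acc : List Int) (p : Int × String) =>
            if p.2 == sep then acc ++ [p.1] else acc) []).map (· + 1) := by
      intro es
      induction es with
      | nil => simp
      | cons p es ih2 =>
        by_cases h : p.2 == sep
        · simp only [List.map_cons, List.foldl_cons, h, if_pos, List.nil_append]
          rw [seps_foldl_acc sep (es.map (fun p => (p.1 + 1, p.2))) [p.1 + 1], seps_foldl_acc sep es [p.1], ih2]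
          simp
        · simp only [List.map_cons, List.foldl_cons, h, if_neg, Bool.false_eq_true, not_false_iff]
          exact ih2
    rw [PySem.List.enumerate_cons]
    have h01 : (0 : Int) + 1 = 1 := by norm_num
    by_cases h : e == sep
    · simp only [List.foldl_cons, h, if_pos, List.nil_append]
      rw [seps_foldl_acc sep, h01, hsh, hmap, ih]
      simp only [pvSepsN, h, if_pos, List.map_cons, List.map_map, List.singleton_append]
      congr 1
    · simp only [List.foldl_cons, h, if_neg, Bool.false_eq_true, not_false_iff]
      rw [h01, hsh, hmap, ih]
      simp only [pvSepsN, h, if_neg, Bool.false_eq_true, not_false_iff, List.map_map]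
      apply List.map_congr_left
      intro a _
      simp [Function.comp]

-- Nat version of B's slicing phase.
def pvPhN (l : List String) : List Nat → (List (List String) × Nat) → (List (List String) × Nat)
  | [], st => st
  | p :: ps, (C, s) => pvPhN l ps (C ++ [(l.drop s).take (p - s)], p + 1)

theorem ph_cast (l : List String) (ns : List Nat) :
    ∀ (C : List (List String)) (s : Nat),
      (ns.map (fun n => (Nat.cast n : Int))).foldl
        (fun (st : List (List String) × Int) pos =>
          (st.1 ++ [PySem.List.slice l (some st.2) (some pos)], pos + 1)) (C, (s : Int))
      = ((pvPhN l ns (C, s)).1, ((pvPhN l ns (C, s)).2 : Int)) := by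
  induction ns with
  | nil => intro C s; simp [pvPhN]
  | cons p ps ih =>
    intro C s
    simp only [List.map_cons, List.foldl_cons]
    rw [PySem.List.slice_natCast]
    have : ((p : Int) + 1) = (((p + 1 : Nat)) : Int) := by push_cast; ring
    rw [this, ih]
    simp [pvPhN]

theorem phN_shift (l : List String) (e : String) (ns : List Nat) :
    ∀ (C : List (List String)) (s : Nat),
      pvPhN (e :: l) (ns.map (· + 1)) (C, s + 1)
      = ((pvPhN l ns (C, s)).1, (pvPhN l ns (C, s)).2 + 1) := by
  induction ns with
  | nil => intro C s; simp [pvPhN]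
  | cons p ps ih =>
    intro C s
    simp only [List.map_cons, pvPhN]
    rw [show p + 1 - (s + 1) = p - s by omega, List.drop_succ_cons, ih]

theorem phN_acc (l : List String) (ns : List Nat) :
    ∀ (C : List (List String)) (s : Nat),
      pvPhN l ns (C, s) = (C ++ (pvPhN l ns ([], s)).1, (pvPhN l ns ([], s)).2) := by
  induction ns with
  | nil => intro C s; simp [pvPhN]
  | cons p ps ih =>
    intro C s
    simp only [pvPhN, List.nil_append]
    rw [ih (C ++ [(l.drop s).take (p - s)]), ih ([(l.drop s).take (p - s)])]
    simp

-- B's pre-filter pipeline (on Nats) equals pvSplits.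
theorem natB_eq_splits (sep : String) (l : List String) :
    (pvPhN l (pvSepsN sep l) ([], 0)).1 ++ [l.drop (pvPhN l (pvSepsN sep l) ([], 0)).2]
    = pvSplits sep l := by
  induction l with
  | nil => simp [pvSepsN, pvPhN, pvSplits]
  | cons e l ih =>
    by_cases h : e == sep
    · simp only [pvSepsN, h, if_pos, pvSplits]
      simp only [pvPhN, List.drop_zero, List.take_zero, List.nil_append]
      rw [show (1 : Nat) = 0 + 1 by rfl, phN_shift, phN_acc]
      simp only [List.drop_succ_cons]
      rw [← ih, phN_acc]
      simp
    · simp only [pvSepsN, h, if_neg, Bool.false_eq_true, not_false_iff, pvSplits]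
      rcases hns : pvSepsN sep l with _ | ⟨p, ps⟩
      · simp only [hns, pvPhN, List.map_nil] at ih ⊢
        simp only [List.drop_zero, List.nil_append] at ih ⊢
        rw [← ih]
      · simp only [hns] at ih
        simp only [List.map_cons, pvPhN, List.drop_zero, Nat.sub_zero, List.nil_append]
        rw [List.take_succ_cons, phN_shift, phN_acc]
        simp only [pvPhN] at ih
        rw [phN_acc l ps] at ih
        simp only [List.drop_zero, Nat.sub_zero, List.nil_append] at ih
        simp only [List.drop_succ_cons]
        rcases hsp : pvSplits sep l with _ | ⟨hd, tl⟩
        · exact absurd hsp (pvSplits_ne_nil sep l)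
        · rw [hsp] at ih
          have h1 : l.take p = hd := by
            have := congrArg (fun xs => xs.headI) ih
            simpa using this
          have h2 : (pvPhN l ps ([], p + 1)).1 ++ [l.drop (pvPhN l ps ([], p + 1)).2] = tl := by
            have := congrArg List.tail ih
            simpa using this
          simp [h1, h2]

-- B's pipeline pre-filter equals pvSplits.
theorem altB_eq_splits (sep : String) (l : List String) :
    (((pvSepsN sep l).map (fun n => (Nat.cast n : Int))).foldl
        (fun (st : List (List String) × Int) pos =>
          (st.1 ++ [PySem.List.slice l (some st.2) (some pos)], pos + 1)) ([], 0)).1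
      ++ [PySem.List.slice l
          (some (((pvSepsN sep l).map (fun n => (Nat.cast n : Int))).foldl
            (fun (st : List (List String) × Int) pos =>
              (st.1 ++ [PySem.List.slice l (some st.2) (some pos)], pos + 1)) ([], 0)).2) none]
    = pvSplits sep l := by
  rw [show ((0 : Int)) = ((0 : Nat) : Int) by norm_num, ph_cast]
  rw [PySem.List.slice_from_natCast]
  exact natB_eq_splits sep l

-- Final assembly: A's conditional-append + filter equals B's always-append + filter.
theorem pvAssemble (X Y : List (List String)) (c : List String) (skip : Bool)
    (h : X ++ [c] = Y) :
    (if skip then (if (!c.isEmpty) || (!skip) then X ++ [c] else X).filter (fun c => !c.isEmpty)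
     else (if (!c.isEmpty) || (!skip) then X ++ [c] else X))
    = (if skip then Y.filter (fun c => !c.isEmpty) else Y) := by
  cases skip with
  | false => simpa using h
  | true =>
    simp only [Bool.not_true, Bool.or_false, if_pos rfl]
    by_cases hc : c.isEmpty
    · have hc' : c = [] := by simpa [List.isEmpty_iff] using hc
      subst hc'
      rw [← h]
      simp [List.filter_append]
    · simp only [Bool.not_eq_true] at hc
      simp [hc, h]

-- ===== VERDICT (by name: the statement is the Claim_ definition above) =====
theorem chunk_input_spec : Claim_equal_chunk_input := by
  intro l sep skip _
  unfold Spec_chunk_input chunk_input chunk_input_alt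
  rw [seps_eq_sepsN]
  have hA : (l.foldl (fun (st : List (List String) × List String) e =>
        if e == sep then (st.1 ++ [st.2], ([] : List String))
        else (st.1, st.2 ++ [e])) ([], [])).1
      ++ [(l.foldl (fun (st : List (List String) × List String) e =>
        if e == sep then (st.1 ++ [st.2], ([] : List String))
        else (st.1, st.2 ++ [e])) ([], [])).2]
      = pvSplits sep l := by
    rw [chunkA_fold]
    rcases hs : pvSplits sep l with _ | ⟨hd, tl⟩
    · exact absurd hs (pvSplits_ne_nil sep l)
    · simp [pvConsHead]
  exact pvAssemble _ _ _ skip (hA.trans (altB_eq_splits sep l).symm)
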